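-- pv_equiv track=rewrite | github.com/daniel-reich/turbo-robot | SdGE4ZBtuMKyxDqQ6_18.py | first_repeat
-- ===== SOURCE A (Python) =====
-- def first_repeat(chars):
--   num_set = set()
--   for i in range(len(chars)):
--     if chars[i] in num_set:
--       return chars[i]
--     else:
--       num_set.add(chars[i])
--   return "-1"
-- ===== SOURCE B (Python) =====
-- def first_repeat(chars):
--     best = len(chars)
--     ans = "-1"
--     for c in dict.fromkeys(chars):
--         second = chars.find(c, chars.find(c) + 1)
--         if second != -1 and second < best:
--             best, ans = second, c
--     return ans
-- ===== Notes on version B (the rewrite author's own statement) =====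
-- stated objective: alternative
-- what changed: Instead of A's single left-to-right scan with a seen-set, B loops over the distinct characters, computes each one's second-occurrence index with str.find, and returns the character whose second occurrence is earliest.
import Mathlib
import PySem

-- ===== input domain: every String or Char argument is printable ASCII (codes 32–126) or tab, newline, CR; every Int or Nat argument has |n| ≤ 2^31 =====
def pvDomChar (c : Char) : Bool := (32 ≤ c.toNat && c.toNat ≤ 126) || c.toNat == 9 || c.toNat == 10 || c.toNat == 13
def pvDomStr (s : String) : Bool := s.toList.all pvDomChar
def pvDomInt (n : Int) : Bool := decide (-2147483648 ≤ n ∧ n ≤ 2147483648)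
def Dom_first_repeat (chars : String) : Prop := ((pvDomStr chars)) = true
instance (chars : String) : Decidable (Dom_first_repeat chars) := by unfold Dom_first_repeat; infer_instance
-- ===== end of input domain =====

-- B replaces A's seen-set scan by a per-distinct-character search: it computes each character's
-- second-occurrence index and returns the character whose second occurrence comes first (alternative algorithm, same return value).


-- ===== PORT A =====
-- A's loop: a set of seen characters; return chars[i] as soon as it is already in the set.
def firstRepeatGoA : List Char → PySem.Set Char → String
  | [], _ => "-1"
  | c :: rest, s =>
    if PySem.Set.contains s c then String.ofList [c]
    else firstRepeatGoA rest (PySem.Set.add s c)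

def first_repeat (chars : String) : String :=
  firstRepeatGoA chars.toList PySem.Set.empty

-- ===== PORT B =====
-- B: for each c in dict.fromkeys(chars) (= PySem.List.dedup), second = chars.find(c, chars.find(c)+1);
-- keep the smallest such second occurrence index and its character.
def first_repeat_alt (chars : String) : String :=
  let l := chars.toList
  let st := (PySem.List.dedup l).foldl
    (fun (st : Int × String) c =>
      let second := PySem.Chars.findFrom l [c] (PySem.Chars.find l [c] + 1)
      if second ≠ -1 ∧ second < st.1 then (second, String.ofList [c]) else st)
    ((l.length : Int), "-1")
  st.2

-- ===== PRECONDITION & SPEC =====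
def Spec_first_repeat (chars : String) (out : String) : Prop := out = first_repeat_alt chars
instance (chars : String) (out : String) : Decidable (Spec_first_repeat chars out) := by unfold Spec_first_repeat; infer_instance

-- ===== CLAIM (what is proved, stated in full; the proofs are below) =====
def Claim_equal_first_repeat : Prop := ∀ (chars : String), Dom_first_repeat chars → Spec_first_repeat chars (first_repeat chars)

-- ===== LEMMAS AND PROOFS =====

-- j is a "repeat position" of l: its character already occurred strictly before j.
def RepAt (l : List Char) (j : Nat) : Prop := ∃ _ : j < l.length, l[j]! ∈ l.take j

-- common characterisation of the answer
def Out (l : List Char) (s : String) : Prop :=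
  (s = "-1" ∧ ∀ j, ¬ RepAt l j)
  ∨ (∃ j, ∃ _ : j < l.length, s = String.ofList [l[j]!] ∧ RepAt l j ∧ ∀ i < j, ¬ RepAt l i)

theorem Out_unique {l : List Char} {s₁ s₂ : String} (h₁ : Out l s₁) (h₂ : Out l s₂) : s₁ = s₂ := by
  rcases h₁ with ⟨e1, n1⟩ | ⟨j1, h1, e1, r1, m1⟩ <;> rcases h₂ with ⟨e2, n2⟩ | ⟨j2, h2, e2, r2, m2⟩
  · rw [e1, e2]
  · exact absurd r2 (n1 j2)
  · exact absurd r1 (n2 j1)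
  · have hj : j1 = j2 := by
      rcases lt_trichotomy j1 j2 with hlt | heq | hgt
      · exact absurd r1 (m2 _ hlt)
      · exact heq
      · exact absurd r2 (m1 _ hgt)
    subst hj; rw [e1, e2]

-- ---- A side ----
def scanF : List Char → List Char → String
  | [], _ => "-1"
  | c :: rest, p =>
    if c ∈ p then String.ofList [c]
    else scanF rest (p ++ [c])

theorem goA_eq_scanF (l p : List Char) :
    firstRepeatGoA l (PySem.Set.ofList p) = scanF l p := by
  induction l generalizing p with
  | nil => rfl
  | cons c rest ih =>
    simp only [firstRepeatGoA, scanF]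
    by_cases h : c ∈ p
    · have h1 : PySem.Set.contains (PySem.Set.ofList p) c = true := by
        rw [PySem.Set.contains_iff]; exact (PySem.Set.mem_ofList p c).2 h
      rw [h1]; simp [h]
    · have h1 : PySem.Set.contains (PySem.Set.ofList p) c = false := by
        rw [Bool.eq_false_iff]
        intro hc
        exact h ((PySem.Set.mem_ofList p c).1 ((PySem.Set.contains_iff _ _).1 hc))
      have h2 : PySem.Set.add (PySem.Set.ofList p) c = PySem.Set.ofList (p ++ [c]) := by
        rw [PySem.Set.ofList_eq_foldl, PySem.Set.ofList_eq_foldl, List.foldl_append]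
        rfl
      rw [h1, h2, ih]; simp [h]

def OutP (p rest : List Char) (s : String) : Prop :=
  (s = "-1" ∧ ∀ j, ∀ _ : j < rest.length, rest[j]! ∉ p ++ rest.take j)
  ∨ (∃ j, ∃ _ : j < rest.length, s = String.ofList [rest[j]!] ∧ rest[j]! ∈ p ++ rest.take j ∧
      ∀ i < j, ∀ _ : i < rest.length, rest[i]! ∉ p ++ rest.take i)

theorem scanF_out (rest : List Char) : ∀ p, OutP p rest (scanF rest p) := by
  induction rest with
  | nil =>
    intro p; left; exact ⟨rfl, fun j hj => absurd hj (by simp)⟩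
  | cons c rest ih =>
    intro p
    by_cases h : c ∈ p
    · right
      refine ⟨0, by simp, by simp [scanF, h], by simpa using h, ?_⟩
      intro i hi; omega
    · have hsc : scanF (c :: rest) p = scanF rest (p ++ [c]) := by simp [scanF, h]
      rw [hsc]
      rcases ih (p ++ [c]) with ⟨e, n⟩ | ⟨j, hj, e, m, mn⟩
      · left
        refine ⟨e, ?_⟩
        intro j hj
        cases j with
        | zero => simpa using h
        | succ j =>
          have hlen : j < rest.length := by simpa using hj
          have := n j hlen
          simp only [List.getElem!_cons_succ, List.take_succ_cons]
          rw [List.append_cons]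
          exact this
      · right
        refine ⟨j + 1, by simpa using hj, ?_, ?_, ?_⟩
        · simpa [List.getElem!_cons_succ] using e
        · simp only [List.getElem!_cons_succ, List.take_succ_cons]
          rw [List.append_cons]
          exact m
        · intro i hi hil
          cases i with
          | zero => simpa using h
          | succ i =>
            have hlen : i < rest.length := by simpa using hil
            have := mn i (by omega) hlen
            simp only [List.getElem!_cons_succ, List.take_succ_cons]
            rw [List.append_cons]
            exact this

theorem A_out (l : List Char) : Out l (firstRepeatGoA l PySem.Set.empty) := by
  have e : firstRepeatGoA l PySem.Set.empty = scanF l [] := goA_eq_scanF l []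
  rw [e]
  rcases scanF_out l [] with ⟨e1, n⟩ | ⟨j, hj, e1, m, mn⟩
  · left
    refine ⟨e1, ?_⟩
    rintro j ⟨hj, hm⟩
    exact n j hj (by simpa using hm)
  · right
    refine ⟨j, hj, e1, ⟨hj, by simpa using m⟩, ?_⟩
    rintro i hi ⟨hil, him⟩
    exact mn i hi hil (by simpa using him)

-- ---- B side ----
theorem single_prefix_drop {l : List Char} {c : Char} {j : Nat} :
    [c] <+: l.drop j ↔ ∃ _ : j < l.length, l[j]! = c := by
  constructor
  · rintro ⟨t, ht⟩
    have hlen : j < l.length := by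
      have h1 : (l.drop j).length = 1 + t.length := by rw [← ht]; simp [Nat.add_comm]
      simp [List.length_drop] at h1
      omega
    refine ⟨hlen, ?_⟩
    have hd : l.drop j = l[j] :: l.drop (j + 1) := (List.getElem_cons_drop hlen).symm
    rw [hd] at ht
    have hhd : c = l[j] := by
      have h2 := ht
      rw [List.singleton_append] at h2
      exact (List.cons_eq_cons.mp h2).1
    rw [getElem!_pos l j hlen, ← hhd]
  · rintro ⟨hlen, hcj⟩
    have hd : l.drop j = l[j] :: l.drop (j + 1) := (List.getElem_cons_drop hlen).symm
    rw [hd]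
    have hhd : c = l[j] := by rw [← hcj, getElem!_pos l j hlen]
    rw [← hhd]
    exact ⟨_, rfl⟩

theorem find_facts {l : List Char} {c : Char} (hc : c ∈ l) :
    0 ≤ PySem.Chars.find l [c] ∧
    ∃ _ : (PySem.Chars.find l [c]).toNat < l.length,
      l[(PySem.Chars.find l [c]).toNat]! = c ∧
      ∀ j, (c ∈ l.take j ↔ (PySem.Chars.find l [c]).toNat < j) := by
  have h0 : 0 ≤ PySem.Chars.find l [c] :=
    (PySem.Chars.find_nonneg_iff l [c]).2 ((List.singleton_infix_iff c l).2 hc)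
  obtain ⟨hpre, hmin⟩ := PySem.Chars.find_spec h0
  obtain ⟨hlen, hget⟩ := single_prefix_drop.1 hpre
  refine ⟨h0, hlen, hget, ?_⟩
  intro j
  constructor
  · intro hmem
    rw [List.mem_iff_getElem] at hmem
    obtain ⟨i, hi, hgi⟩ := hmem
    have hij : i < j := by simp [List.length_take] at hi; omega
    have hil : i < l.length := by simp [List.length_take] at hi; omega
    have hli : l[i]! = c := by
      rw [getElem!_pos l i hil, ← List.getElem_take (h := hi)]
      exact hgi
    have : ¬ i < (PySem.Chars.find l [c]).toNat :=
      fun hlt => hmin i hlt (single_prefix_drop.2 ⟨hil, hli⟩)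
    omega
  · intro hlt
    rw [List.mem_iff_getElem]
    refine ⟨(PySem.Chars.find l [c]).toNat, by simp [List.length_take]; omega, ?_⟩
    rw [List.getElem_take, ← getElem!_pos l _ hlen]
    exact hget

def secondVal (l : List Char) (c : Char) : Int :=
  PySem.Chars.findFrom l [c] (PySem.Chars.find l [c] + 1)

theorem sec_spec {l : List Char} {c : Char} (hc : c ∈ l) :
    (secondVal l c = -1 → ∀ j, RepAt l j → l[j]! ≠ c)
    ∧ (secondVal l c ≠ -1 → 0 ≤ secondVal l c ∧
        ∃ _ : (secondVal l c).toNat < l.length,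
          l[(secondVal l c).toNat]! = c ∧ RepAt l (secondVal l c).toNat ∧
          ∀ j < (secondVal l c).toNat, RepAt l j → l[j]! ≠ c) := by
  obtain ⟨h0, hflen, hfget, htake⟩ := find_facts hc
  have hk : PySem.Chars.find l [c] + 1 = (((PySem.Chars.find l [c]).toNat + 1 : Nat) : Int) := by
    omega
  have hkle : (PySem.Chars.find l [c]).toNat + 1 ≤ l.length := by omega
  constructor
  · intro hneg j hrep hgc
    unfold secondVal at hneg
    rw [hk] at hneg
    have hnin := (PySem.Chars.findFrom_natCast_eq_neg_one_iff l [c] _ hkle).1 hneg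
    obtain ⟨hjlen, hjmem⟩ := hrep
    rw [hgc] at hjmem
    have hfj : (PySem.Chars.find l [c]).toNat < j := (htake j).1 hjmem
    apply hnin
    have hpj : [c] <+: l.drop j := single_prefix_drop.2 ⟨hjlen, hgc⟩
    have hsuf : l.drop j <:+ l.drop ((PySem.Chars.find l [c]).toNat + 1) := by
      have hdd : l.drop j = (l.drop ((PySem.Chars.find l [c]).toNat + 1)).drop
          (j - ((PySem.Chars.find l [c]).toNat + 1)) := by
        rw [List.drop_drop]; congr 1; omega
      rw [hdd]
      exact List.drop_suffix _ _
    exact List.IsInfix.trans hpj.isInfix hsuf.isInfix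
  · intro hne
    unfold secondVal at hne ⊢
    rw [hk] at hne ⊢
    obtain ⟨hge, hpre, hmin⟩ := PySem.Chars.findFrom_natCast_spec l [c] _ hkle hne
    have h0s : (0 : Int) ≤ PySem.Chars.findFrom l [c]
        (((PySem.Chars.find l [c]).toNat + 1 : Nat) : Int) := le_trans (by omega) hge
    obtain ⟨hslen, hsget⟩ := single_prefix_drop.1 hpre
    refine ⟨h0s, hslen, hsget, ⟨hslen, ?_⟩, ?_⟩
    · rw [hsget]
      exact (htake _).2 (by omega)
    · intro j hj hrep hgc
      obtain ⟨hjlen, hjmem⟩ := hrep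
      rw [hgc] at hjmem
      have hfj : (PySem.Chars.find l [c]).toNat < j := (htake j).1 hjmem
      exact absurd (single_prefix_drop.2 ⟨hjlen, hgc⟩) (hmin j (by omega) hj)

def InvB (l S : List Char) (st : Int × String) : Prop :=
  (st = ((l.length : Int), "-1") ∧ ∀ j, RepAt l j → l[j]! ∉ S)
  ∨ (∃ j, ∃ _ : j < l.length, st = ((j : Int), String.ofList [l[j]!]) ∧ RepAt l j ∧ l[j]! ∈ S ∧
      ∀ i < j, RepAt l i → l[i]! ∉ S)

theorem step_inv {l S : List Char} {st : Int × String} {c : Char} (hc : c ∈ l) (h : InvB l S st) :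
    InvB l (S ++ [c])
      (if secondVal l c ≠ -1 ∧ secondVal l c < st.1
       then (secondVal l c, String.ofList [c]) else st) := by
  obtain ⟨hno, hyes⟩ := sec_spec hc
  split_ifs with hif
  · obtain ⟨h0, hslen, hsget, hsrep, hsmin⟩ := hyes hif.1
    right
    refine ⟨(secondVal l c).toNat, hslen, ?_, hsrep, ?_, ?_⟩
    · rw [hsget, Int.toNat_of_nonneg h0]
    · rw [hsget]; simp
    · intro i hi hr hmem
      rcases List.mem_append.1 hmem with hmS | hmc
      · rcases h with ⟨hst, hall⟩ | ⟨j0, hj0, hst0, _, _, hmin0⟩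
        · exact hall i hr hmS
        · have hlt : i < j0 := by
            have hsv : secondVal l c < (j0 : Int) := by rw [hst0] at hif; exact hif.2
            omega
          exact hmin0 i hlt hr hmS
      · have hgc : l[i]! = c := by simpa using hmc
        exact hsmin i hi hr hgc
  · push Not at hif
    rcases h with ⟨hst, hall⟩ | ⟨j0, hj0, hst0, hrep0, hmem0, hmin0⟩
    · left
      refine ⟨hst, ?_⟩
      intro j hr hmem
      rcases List.mem_append.1 hmem with hmS | hmc
      · exact hall j hr hmS
      · have hgc : l[j]! = c := by simpa using hmc
        by_cases hsv : secondVal l c = -1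
        · exact hno hsv j hr hgc
        · obtain ⟨h0, hslen, _, _, _⟩ := hyes hsv
          have hle : st.1 ≤ secondVal l c := hif hsv
          rw [hst] at hle
          simp at hle
          omega
    · right
      refine ⟨j0, hj0, hst0, hrep0, List.mem_append_left _ hmem0, ?_⟩
      intro i hi hr hmem
      rcases List.mem_append.1 hmem with hmS | hmc
      · exact hmin0 i hi hr hmS
      · have hgc : l[i]! = c := by simpa using hmc
        by_cases hsv : secondVal l c = -1
        · exact hno hsv i hr hgc
        · obtain ⟨h0, hslen, _, _, hsmin⟩ := hyes hsv
          have hle : st.1 ≤ secondVal l c := hif hsv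
          rw [hst0] at hle
          simp at hle
          exact hsmin i (by omega) hr hgc

theorem fold_inv (l : List Char) (ds : List Char) : ∀ (S : List Char) (st : Int × String),
    (∀ c ∈ ds, c ∈ l) → InvB l S st →
    InvB l (S ++ ds)
      (ds.foldl (fun (st : Int × String) c =>
        let second := PySem.Chars.findFrom l [c] (PySem.Chars.find l [c] + 1)
        if second ≠ -1 ∧ second < st.1 then (second, String.ofList [c]) else st) st) := by
  induction ds with
  | nil => intro S st _ h; simpa using h
  | cons c ds ih =>
    intro S st hds h
    simp only [List.foldl_cons]
    have hstep := step_inv (hds c (by simp)) h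
    have hrec := ih (S ++ [c]) _ (fun x hx => hds x (by simp [hx])) hstep
    rw [List.append_cons]
    exact hrec

theorem B_out (l : List Char) :
    Out l (((PySem.List.dedup l).foldl
      (fun (st : Int × String) c =>
        let second := PySem.Chars.findFrom l [c] (PySem.Chars.find l [c] + 1)
        if second ≠ -1 ∧ second < st.1 then (second, String.ofList [c]) else st)
      ((l.length : Int), "-1")).2) := by
  have hinit : InvB l [] ((l.length : Int), "-1") := Or.inl ⟨rfl, by simp⟩
  have h := fold_inv l (PySem.List.dedup l) [] ((l.length : Int), "-1")
    (fun c hcm => (PySem.List.mem_dedup _ _).1 hcm) hinit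
  rcases h with ⟨hst, hall⟩ | ⟨j, hj, hst, hrep, _, hmin⟩
  · left
    refine ⟨by rw [hst], ?_⟩
    intro j hr
    have hjlen : j < l.length := hr.1
    refine hall j hr ?_
    simp only [List.nil_append]
    exact (PySem.List.mem_dedup _ _).2 (by rw [getElem!_pos l j hjlen]; exact List.getElem_mem hjlen)
  · right
    refine ⟨j, hj, by rw [hst], hrep, ?_⟩
    intro i hi hr
    have hilen : i < l.length := hr.1
    refine hmin i hi hr ?_
    simp only [List.nil_append]
    exact (PySem.List.mem_dedup _ _).2 (by rw [getElem!_pos l i hilen]; exact List.getElem_mem hilen)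

-- ===== VERDICT (by name: the statement is the Claim_ definition above) =====
theorem first_repeat_spec : Claim_equal_first_repeat := by
  intro chars _
  unfold Spec_first_repeat first_repeat first_repeat_alt
  exact Out_unique (A_out chars.toList) (B_out chars.toList)
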